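-- pv_equiv track=rewrite | github.com/lsipii/newsfeed | app/article_views.py | _collapse_prefix_variants
-- ===== SOURCE A (Python) =====
-- from typing import Dict, List, Literal, Set, TypedDict
--
-- _MAX_PREFIX_INFLECTION_DELTA = 5
--
-- def _collapse_prefix_variants(terms: Set[str]) -> Set[str]:
--     """Drop longer strings that only extend a shorter candidate."""
--     if len(terms) <= 1:
--         return set(terms)
--     kept: Set[str] = set()
--     for s in sorted(terms, key=len):
--         if any(
--             s != t
--             and len(t) < len(s)
--             and s.startswith(t)
--             and len(s) - len(t) <= _MAX_PREFIX_INFLECTION_DELTA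
--             for t in terms
--         ):
--             continue
--         kept.add(s)
--     return kept
-- ===== SOURCE B (Python) =====
-- # B: hash the candidate pool once and, for each string, test its at most five
-- # possible shortened prefixes by set membership -- O(n*L) instead of A's O(n^2*L) inner scan.
-- _MAX_PREFIX_INFLECTION_DELTA = 5
--
--
-- def _collapse_prefix_variants(terms):
--     """Drop longer strings that only extend a shorter candidate."""
--     pool = set(terms)
--     return {
--         s
--         for s in sorted(pool, key=len)
--         if not any(
--             d <= len(s) and s[: len(s) - d] in pool
--             for d in range(1, _MAX_PREFIX_INFLECTION_DELTA + 1)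
--         )
--     }
-- ===== Notes on version B (the rewrite author's own statement) =====
-- stated objective: faster
-- what changed: Replaces A's inner scan over all terms (checking every candidate as a possible shorter prefix) by a single hashed pool and, per string, at most five membership tests of its sliced prefixes (lengths len(s)-1 .. len(s)-5).
import Mathlib
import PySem

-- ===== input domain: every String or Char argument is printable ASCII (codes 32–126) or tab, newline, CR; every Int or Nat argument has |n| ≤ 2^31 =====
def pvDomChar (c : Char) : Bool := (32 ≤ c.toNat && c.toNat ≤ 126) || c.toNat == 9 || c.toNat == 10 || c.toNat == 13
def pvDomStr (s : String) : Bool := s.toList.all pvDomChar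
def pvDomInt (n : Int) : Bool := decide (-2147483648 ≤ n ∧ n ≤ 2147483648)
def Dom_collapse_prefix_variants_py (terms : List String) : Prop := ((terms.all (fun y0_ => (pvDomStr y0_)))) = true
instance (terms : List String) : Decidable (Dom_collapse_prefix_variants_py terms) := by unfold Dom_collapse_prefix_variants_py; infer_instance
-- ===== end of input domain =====

-- B replaces A's per-string scan over all terms by at most five prefix-slice
-- membership tests against the hashed pool (a different, faster algorithm).

-- ===== PORT A =====
def collapse_prefix_variants_py (terms : List String) : List String :=
  let S : PySem.Set String := PySem.Set.ofList terms
  if PySem.Set.len S ≤ 1 then S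
  else
    (PySem.List.sorted S (fun s => PySem.Str.len s)).foldl
      (fun kept s =>
        if S.any (fun t =>
              decide (s ≠ t) && decide (PySem.Str.len t < PySem.Str.len s)
              && PySem.Str.startswith s t
              && decide (PySem.Str.len s - PySem.Str.len t ≤ 5))
        then kept
        else PySem.Set.add kept s)
      PySem.Set.empty

-- ===== PORT B =====
def collapse_prefix_variants_py_alt (terms : List String) : List String :=
  let pool : PySem.Set String := PySem.Set.ofList terms
  PySem.Set.ofList
    ((PySem.List.sorted pool (fun s => PySem.Str.len s)).filter
      (fun s => ! (PySem.List.pyRange 1 6).any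
          (fun d => decide (d ≤ PySem.Str.len s)
              && PySem.Set.contains pool (PySem.Str.slice s none (some (PySem.Str.len s - d))))))

-- ===== PRECONDITION & SPEC =====
def Spec_collapse_prefix_variants_py (terms : List String) (out : List String) : Prop := out = collapse_prefix_variants_py_alt terms
instance (terms : List String) (out : List String) : Decidable (Spec_collapse_prefix_variants_py terms out) := by unfold Spec_collapse_prefix_variants_py; infer_instance

-- ===== CLAIM (what is proved, stated in full; the proofs are below) =====
def Claim_equal_collapse_prefix_variants_py : Prop := ∀ (terms : List String), Dom_collapse_prefix_variants_py terms → Spec_collapse_prefix_variants_py terms (collapse_prefix_variants_py terms)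

-- ===== LEMMAS AND PROOFS =====

-- The drop test A makes by scanning every candidate t equals the drop test B makes
-- by slicing off 1..5 trailing characters and looking the prefix up in the pool.
lemma pred_eq (S : PySem.Set String) (s : String) :
    (S.any (fun t =>
        decide (s ≠ t) && decide (PySem.Str.len t < PySem.Str.len s)
        && PySem.Str.startswith s t
        && decide (PySem.Str.len s - PySem.Str.len t ≤ 5)))
    = ((PySem.List.pyRange 1 6).any
        (fun d => decide (d ≤ PySem.Str.len s)
            && PySem.Set.contains S (PySem.Str.slice s none (some (PySem.Str.len s - d))))) := by
  rw [Bool.eq_iff_iff]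
  simp only [List.any_eq_true, Bool.and_eq_true, decide_eq_true_eq,
    PySem.List.mem_pyRange_one, PySem.Str.startswith_eq, PySem.Chars.startswith_iff,
    PySem.Set.contains_iff, PySem.Str.len]
  constructor
  · rintro ⟨t, ht, ⟨⟨hne, hlt⟩, hpre⟩, hdelta⟩
    refine ⟨(s.toList.length : Int) - (t.toList.length : Int), ⟨by omega, by omega⟩,
      by omega, ?_⟩
    have hb : (s.toList.length : Int) - ((s.toList.length : Int) - (t.toList.length : Int))
        = (t.toList.length : Int) := by ring
    rw [hb]
    have : PySem.Str.slice s none (some (t.toList.length : Int)) = t := by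
      unfold PySem.Str.slice PySem.Chars.slice
      rw [PySem.List.slice_to _ (by positivity)]
      simp only [Int.toNat_natCast]
      rw [← List.prefix_iff_eq_take.mp hpre, String.ofList_toList]
    rw [this]; exact ht
  · rintro ⟨d, ⟨hd1, hd6⟩, hdle, hmem⟩
    refine ⟨PySem.Str.slice s none (some ((s.toList.length : Int) - d)), hmem, ?_⟩
    have h0 : (0:Int) ≤ (s.toList.length : Int) - d := by omega
    have htl : (PySem.Str.slice s none (some ((s.toList.length : Int) - d))).toList
        = List.take ((s.toList.length : Int) - d).toNat s.toList := by
      unfold PySem.Str.slice PySem.Chars.slice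
      rw [PySem.List.slice_to _ h0, String.toList_ofList]
    have hlen : (PySem.Str.slice s none (some ((s.toList.length : Int) - d))).toList.length
        = s.toList.length - d.toNat := by
      rw [htl, List.length_take]; omega
    have hltn : ((PySem.Str.slice s none (some ((s.toList.length : Int) - d))).toList.length : Int)
        < (s.toList.length : Int) := by rw [hlen]; omega
    refine ⟨⟨⟨?_, hltn⟩, ?_⟩, ?_⟩
    · intro h
      have hc := congrArg (fun x => x.toList.length) h
      simp only [] at hc
      rw [hlen] at hc
      omega
    · rw [htl]; exact List.take_prefix _ _
    · rw [hlen]; omega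

-- A's skip-or-add loop over a duplicate-free list starting from a disjoint accumulator
-- appends exactly the elements the predicate rejects.
lemma foldl_skip_add (p : String → Bool) :
    ∀ (L acc : List String), L.Nodup → (∀ s ∈ L, s ∉ acc) →
    L.foldl (fun kept s => if p s then kept else PySem.Set.add kept s) acc
      = acc ++ L.filter (fun s => ! p s) := by
  intro L
  induction L with
  | nil => intro acc _ _; simp
  | cons s L ih =>
    intro acc hnd hdis
    simp only [List.foldl_cons, List.filter_cons]
    by_cases hp : p s
    · simp only [hp, if_pos, Bool.not_true]
      simpa using ih acc (List.nodup_cons.mp hnd).2 (fun t ht => hdis t (List.mem_cons_of_mem _ ht))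
    · simp only [hp, Bool.not_false, if_pos, Bool.false_eq_true, if_false]
      rw [PySem.Set.add_of_not_mem (hdis s (List.mem_cons_self)),
          ih (acc ++ [s]) (List.nodup_cons.mp hnd).2]
      · simp
      · intro t ht
        simp only [List.mem_append, List.mem_singleton]
        rintro (h | rfl)
        · exact hdis t (List.mem_cons_of_mem _ ht) h
        · exact (List.nodup_cons.mp hnd).1 ht

-- ===== VERDICT (by name: the statement is the Claim_ definition above) =====
theorem collapse_prefix_variants_py_spec : Claim_equal_collapse_prefix_variants_py := by
  intro terms _
  unfold Spec_collapse_prefix_variants_py collapse_prefix_variants_py collapse_prefix_variants_py_alt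
  simp only []
  set S := PySem.Set.ofList terms with hSdef
  have hnd : S.Nodup := PySem.Set.nodup_ofList terms
  have hLnd : (PySem.List.sorted S (fun s => PySem.Str.len s)).Nodup :=
    (PySem.List.sorted_perm S (fun s => PySem.Str.len s) false).nodup_iff.mpr hnd
  rw [PySem.Set.ofList_eq_self_of_nodup _ (hLnd.filter _)]
  by_cases hlen : PySem.Set.len S ≤ 1
  · rw [if_pos hlen]
    have hlen' : S.length ≤ 1 := by
      have : PySem.Set.len S = (S.length : Int) := rfl
      omega
    match S, hnd, hlen' with
    | [], _, _ => simp
    | [a], _, _ =>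
      rw [PySem.List.sorted_eq_self_of_pairwise _ _ (by simp)]
      rw [List.filter_singleton]
      rw [show ((PySem.List.pyRange 1 6).any
          (fun d => decide (d ≤ PySem.Str.len a)
              && PySem.Set.contains [a] (PySem.Str.slice a none (some (PySem.Str.len a - d)))))
          = false from by rw [← pred_eq]; simp]
      rfl
  · rw [if_neg hlen]
    rw [foldl_skip_add _ _ _ hLnd (by intro s _ h; exact (List.not_mem_nil) h)]
    rw [show (PySem.Set.empty : List String) = [] from rfl, List.nil_append]
    exact List.filter_congr (fun x _ => by rw [pred_eq])
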